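-- pv_equiv track=rewrite | github.com/peterprospl12/breathing-classification-v2 | breathing_model/analysis/evaluate_breath_events_two_transformers.py | smooth_short_runs
-- ===== SOURCE A (Python) =====
-- def smooth_short_runs(sequence: list[int], min_run_len: int = 2) -> list[int]:
--     if not sequence:
--         return sequence
--
--     arr = list(sequence)
--     n = len(arr)
--     i = 0
--     while i < n:
--         j = i + 1
--         while j < n and arr[j] == arr[i]:
--             j += 1
--
--         run_len = j - i
--         if run_len < min_run_len:
--             prev_cls = arr[i - 1] if i > 0 else None
--             next_cls = arr[j] if j < n else None
--             if prev_cls is not None and next_cls is not None and prev_cls == next_cls: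
--                 fill_cls = prev_cls
--             elif prev_cls is not None:
--                 fill_cls = prev_cls
--             elif next_cls is not None:
--                 fill_cls = next_cls
--             else:
--                 fill_cls = arr[i]
--             for k in range(i, j):
--                 arr[k] = fill_cls
--
--         i = j
--
--     return arr
-- ===== SOURCE B (Python) =====
-- def smooth_short_runs(sequence: list[int], min_run_len: int = 2) -> list[int]:
--     if not sequence:
--         return sequence
--     # one pass: run-length encode
--     runs = []
--     for v in sequence:
--         if runs and runs[-1][0] == v:
--             runs[-1] = (v, runs[-1][1] + 1)
--         else:
--             runs.append((v, 1))
--     # second pass over runs with a last-finalized-value accumulator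
--     out = []
--     last = None
--     for idx, (v, ln) in enumerate(runs):
--         if ln >= min_run_len:
--             fill = v
--         elif last is not None:
--             fill = last
--         elif idx + 1 < len(runs):
--             fill = runs[idx + 1][0]
--         else:
--             fill = v
--         out.extend([fill] * ln)
--         last = fill
--     return out
-- ===== Notes on version B (the rewrite author's own statement) =====
-- stated objective: alternative
-- what changed: A mutates a copy of the list in place with nested index-based while-loops (re-reading filled cells via arr[i-1]); B first builds an explicit run-length encoding in one pass and then emits the output from the runs with a last-finalized-value accumulator and a lookahead at the next run, never mutating.
import Mathlib
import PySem

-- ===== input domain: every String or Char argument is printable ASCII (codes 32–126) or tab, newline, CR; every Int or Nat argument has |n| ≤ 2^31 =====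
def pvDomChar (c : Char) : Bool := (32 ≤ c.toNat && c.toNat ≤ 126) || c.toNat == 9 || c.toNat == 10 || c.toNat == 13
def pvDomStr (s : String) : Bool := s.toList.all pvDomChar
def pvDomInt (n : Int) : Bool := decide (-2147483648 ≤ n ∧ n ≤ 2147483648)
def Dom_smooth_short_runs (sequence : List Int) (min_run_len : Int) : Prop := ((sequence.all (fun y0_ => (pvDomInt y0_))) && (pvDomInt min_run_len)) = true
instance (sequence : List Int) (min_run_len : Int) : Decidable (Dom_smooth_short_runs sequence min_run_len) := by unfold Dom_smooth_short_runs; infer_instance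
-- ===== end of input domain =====

-- B replaces A's in-place while-loop rewriting with a run-length encoding pass followed by an
-- accumulator pass over the runs (objective: alternative decomposition, same linear cost; no mutation).

-- ===== PORT A =====
-- inner while loop: 'while j < n and arr[j] == arr[i]'
def pvAInner (arr : List Int) (n : Nat) (v : Int) (j : Nat) : Nat :=
  if h : j < n ∧ arr.getD j 0 = v then pvAInner arr n v (j + 1) else j
termination_by n - j
decreasing_by omega

theorem pvAInner_ge (arr : List Int) (n : Nat) (v : Int) (j : Nat) : j ≤ pvAInner arr n v j := by
  fun_induction pvAInner with
  | case1 j h ih => omega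
  | case2 j h => omega

-- 'for k in range(i, j): arr[k] = fill_cls'
def pvSetRange (arr : List Int) (fill : Int) (i j : Nat) : List Int :=
  if i < j then pvSetRange (arr.set i fill) fill (i + 1) j else arr
termination_by j - i

-- outer while loop on state (arr, i)
def pvAOuter (min_run_len : Int) (arr : List Int) (n : Nat) (i : Nat) : List Int :=
  if h : i < n then
    let j := pvAInner arr n (arr.getD i 0) (i + 1)
    let arr' :=
      if (j : Int) - (i : Int) < min_run_len then
        let prev_cls : Option Int := if 0 < i then some (arr.getD (i - 1) 0) else none
        let next_cls : Option Int := if j < n then some (arr.getD j 0) else none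
        let fill :=
          if prev_cls.isSome && next_cls.isSome && (prev_cls.getD 0 == next_cls.getD 0) then prev_cls.getD 0
          else if prev_cls.isSome then prev_cls.getD 0
          else if next_cls.isSome then next_cls.getD 0
          else arr.getD i 0
        pvSetRange arr fill i j
      else arr
    pvAOuter min_run_len arr' n j
  else arr
termination_by n - i
decreasing_by
  have := pvAInner_ge arr n (arr.getD i 0) (i + 1)
  omega

def smooth_short_runs (sequence : List Int) (min_run_len : Int) : List Int :=
  if sequence = [] then sequence
  else pvAOuter min_run_len sequence sequence.length 0

-- ===== PORT B =====
-- runs[-1] is the head of the accumulator (runs kept reversed, reversed once at the end)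
def pvRleStep (acc : List (Int × Nat)) (v : Int) : List (Int × Nat) :=
  match acc with
  | (w, c) :: rest => if w = v then (w, c + 1) :: rest else (v, 1) :: (w, c) :: rest
  | [] => [(v, 1)]

-- second pass: 'last' accumulator; lookahead 'runs[idx+1][0]' is the head of the remaining runs
def pvFillRuns (min_run_len : Int) (last : Option Int) : List (Int × Nat) → List Int
  | [] => []
  | (v, ln) :: rest =>
      let fill :=
        if min_run_len ≤ (ln : Int) then v
        else match last with
          | some l => l
          | none => match rest with
            | (nv, _) :: _ => nv
            | [] => v
      List.replicate ln fill ++ pvFillRuns min_run_len (some fill) rest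

def smooth_short_runs_alt (sequence : List Int) (min_run_len : Int) : List Int :=
  if sequence = [] then sequence
  else pvFillRuns min_run_len none ((sequence.foldl pvRleStep []).reverse)

-- ===== PRECONDITION & SPEC =====
def Spec_smooth_short_runs (sequence : List Int) (min_run_len : Int) (out : List Int) : Prop := out = smooth_short_runs_alt sequence min_run_len
instance (sequence : List Int) (min_run_len : Int) (out : List Int) : Decidable (Spec_smooth_short_runs sequence min_run_len out) := by unfold Spec_smooth_short_runs; infer_instance

-- ===== CLAIM (what is proved, stated in full; the proofs are below) =====
def Claim_equal_smooth_short_runs : Prop := ∀ (sequence : List Int) (min_run_len : Int), Dom_smooth_short_runs sequence min_run_len → Spec_smooth_short_runs sequence min_run_len (smooth_short_runs sequence min_run_len)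

-- ===== LEMMAS AND PROOFS =====

/-- length of the maximal leading block of `v`s -/
def leadCount (v : Int) : List Int → Nat
  | [] => 0
  | w :: t => if w = v then leadCount v t + 1 else 0

/-- run-length encoding of `v^c ++ t` (front form) -/
def runsFrom (v : Int) (c : Nat) : List Int → List (Int × Nat)
  | [] => [(v, c)]
  | w :: t => if w = v then runsFrom v (c + 1) t else (v, c) :: runsFrom w 1 t

def runsOf : List Int → List (Int × Nat)
  | [] => []
  | v :: t => runsFrom v 1 t

theorem foldl_pvRleStep (t : List Int) (v : Int) (c : Nat) (rest : List (Int × Nat)) :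
    t.foldl pvRleStep ((v, c) :: rest) = (runsFrom v c t).reverse ++ rest := by
  induction t generalizing v c rest with
  | nil => simp [runsFrom]
  | cons w t ih =>
      simp only [List.foldl_cons, pvRleStep, runsFrom]
      by_cases h : w = v
      · simp [h, ih]
      · simp [h, ih, Ne.symm h]

theorem rle_eq_runsOf (s : List Int) : (s.foldl pvRleStep []).reverse = runsOf s := by
  cases s with
  | nil => simp [runsOf]
  | cons v t =>
      simp [runsOf, List.foldl_cons, pvRleStep, foldl_pvRleStep]

theorem leadCount_le (v : Int) (t : List Int) : leadCount v t ≤ t.length := by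
  induction t with
  | nil => simp [leadCount]
  | cons w t ih =>
      by_cases h : w = v
      · simp [leadCount, h]; omega
      · simp [leadCount, h]

theorem leadCount_getD (v : Int) (t : List Int) (k : Nat) (h : k < leadCount v t) :
    t.getD k 0 = v := by
  induction t generalizing k with
  | nil => simp [leadCount] at h
  | cons w t ih =>
      by_cases hw : w = v
      · cases k with
        | zero => simp [hw]
        | succ k => simp only [leadCount, hw, if_true] at h; exact ih k (by omega)
      · simp [leadCount, hw] at h

theorem take_leadCount (v : Int) (t : List Int) :
    t.take (leadCount v t) = List.replicate (leadCount v t) v := by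
  induction t with
  | nil => simp [leadCount]
  | cons w t ih =>
      by_cases hw : w = v
      · simp [leadCount, hw, List.replicate_succ, ih]
      · simp [leadCount, hw]

theorem runsFrom_eq (v : Int) (c : Nat) (t : List Int) :
    runsFrom v c t = (v, c + leadCount v t) :: runsOf (t.drop (leadCount v t)) := by
  induction t generalizing c with
  | nil => simp [runsFrom, runsOf, leadCount]
  | cons w t ih =>
      by_cases hw : w = v
      · subst hw
        have h1 : runsFrom w c (w :: t) = runsFrom w (c + 1) t := by simp [runsFrom]
        have h2 : leadCount w (w :: t) = leadCount w t + 1 := by simp [leadCount]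
        rw [h1, ih, h2, List.drop_succ_cons]
        have h3 : c + 1 + leadCount w t = c + (leadCount w t + 1) := by omega
        rw [h3]
      · simp [runsFrom, leadCount, hw, runsOf]

theorem pvAInner_eq (arr : List Int) (v : Int) (j : Nat) (hj : j ≤ arr.length) :
    pvAInner arr arr.length v j = j + leadCount v (arr.drop j) := by
  fun_induction pvAInner with
  | case1 j h ih =>
      obtain ⟨hjl, hv⟩ := h
      have hd : arr.drop j = arr.getD j 0 :: arr.drop (j + 1) := by
        rw [List.getD_eq_getElem _ _ hjl]
        exact (List.getElem_cons_drop hjl).symm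
      rw [hd, hv, leadCount, if_pos rfl, ih (by omega)]
      omega
  | case2 j h =>
      rcases Nat.lt_or_ge j arr.length with hjl | hjl
      · have hd : arr.drop j = arr.getD j 0 :: arr.drop (j + 1) := by
          rw [List.getD_eq_getElem _ _ hjl]
          exact (List.getElem_cons_drop hjl).symm
        have hv : ¬ arr.getD j 0 = v := by tauto
        rw [hd, leadCount, if_neg hv]
        omega
      · have : arr.drop j = [] := List.drop_eq_nil_of_le hjl
        rw [this, leadCount]
        omega

theorem pvSetRange_eq (arr : List Int) (fill : Int) (i j : Nat) (hij : i ≤ j)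
    (hj : j ≤ arr.length) :
    pvSetRange arr fill i j = arr.take i ++ List.replicate (j - i) fill ++ arr.drop j := by
  fun_induction pvSetRange with
  | case1 arr i h ih =>
      rw [ih (by omega) (by simpa using hj)]
      have hi : i < arr.length := by omega
      rw [List.set_eq_take_append_cons_drop, if_pos hi]
      have hlt : (arr.take i).length = i := by simp; omega
      rw [List.take_append, List.drop_append, hlt]
      rw [List.take_take, Nat.min_eq_right (by omega)]
      have e1 : i + 1 - i = 1 := by omega
      rw [e1]
      have e2 : (fill :: arr.drop (i + 1)).take 1 = [fill] := rfl
      rw [e2]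
      have e3 : (arr.take i).drop j = [] := List.drop_of_length_le (by rw [hlt]; omega)
      rw [e3, List.nil_append]
      have h3 : (fill :: arr.drop (i + 1)).drop (j - i) = arr.drop j := by
        have h4 : j - i = (j - (i + 1)) + 1 := by omega
        rw [h4, List.drop_succ_cons, List.drop_drop]
        congr 1
        omega
      rw [h3]
      have h5 : j - i = (j - (i + 1)) + 1 := by omega
      rw [h5, List.replicate_succ]
      simp
  | case2 arr i h =>
      have hij2 : i = j := by omega
      subst hij2
      simp

theorem drop_getD_cons (arr : List Int) (i : Nat) (hi : i < arr.length) :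
    arr.drop i = arr.getD i 0 :: arr.drop (i + 1) := by
  rw [List.getD_eq_getElem _ _ hi]
  exact (List.getElem_cons_drop hi).symm

-- the fill value B's pass chooses for one run (pvFillRuns's let, named for the proofs)
def fillVal (min : Int) (last : Option Int) (v : Int) (ln : Nat) (rest : List (Int × Nat)) : Int :=
  if min ≤ (ln : Int) then v
  else match last with
    | some l => l
    | none => match rest with
      | (nv, _) :: _ => nv
      | [] => v

theorem pvFillRuns_cons (min : Int) (last : Option Int) (v : Int) (ln : Nat)
    (rest : List (Int × Nat)) :
    pvFillRuns min last ((v, ln) :: rest) =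
      List.replicate ln (fillVal min last v ln rest) ++
        pvFillRuns min (some (fillVal min last v ln rest)) rest := rfl

-- A's fill value, named so the goals of the main induction stay small
def fillA (arr : List Int) (n i j : Nat) : Int :=
  let prev_cls : Option Int := if 0 < i then some (arr.getD (i - 1) 0) else none
  let next_cls : Option Int := if j < n then some (arr.getD j 0) else none
  if prev_cls.isSome && next_cls.isSome && (prev_cls.getD 0 == next_cls.getD 0) then prev_cls.getD 0
  else if prev_cls.isSome then prev_cls.getD 0
  else if next_cls.isSome then next_cls.getD 0
  else arr.getD i 0

theorem pvAOuter_step (min : Int) (arr : List Int) (n i : Nat) (h : i < n) :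
    pvAOuter min arr n i =
      pvAOuter min
        (if ((pvAInner arr n (arr.getD i 0) (i + 1) : Nat) : Int) - (i : Nat) < min
         then pvSetRange arr (fillA arr n i (pvAInner arr n (arr.getD i 0) (i + 1))) i
           (pvAInner arr n (arr.getD i 0) (i + 1))
         else arr) n (pvAInner arr n (arr.getD i 0) (i + 1)) := by
  rw [pvAOuter, dif_pos h]
  rfl

-- main characterization of A's outer loop
theorem pvAOuter_eq_aux (min : Int) (k : Nat) : ∀ (arr : List Int) (i : Nat), i ≤ arr.length →
    arr.length - i ≤ k →
    pvAOuter min arr arr.length i =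
      arr.take i ++
        pvFillRuns min (if i = 0 then none else some (arr.getD (i - 1) 0)) (runsOf (arr.drop i)) := by
  induction k with
  | zero =>
      intro arr i hi hk
      have hin : i = arr.length := by omega
      rw [pvAOuter, dif_neg (by omega)]
      subst hin
      simp [List.drop_length, runsOf, pvFillRuns]
  | succ k ih =>
      intro arr i hi hk
      by_cases hiln : i < arr.length
      case neg =>
        have hin : i = arr.length := by omega
        rw [pvAOuter, dif_neg (by omega)]
        subst hin
        simp [List.drop_length, runsOf, pvFillRuns]
      case pos =>
      set v := arr.getD i 0 with hv
      have hdi : arr.drop i = v :: arr.drop (i + 1) := drop_getD_cons arr i hiln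
      set c := leadCount v (arr.drop (i + 1)) with hc
      have hcle : c ≤ arr.length - (i + 1) := by
        have := leadCount_le v (arr.drop (i + 1))
        simp only [List.length_drop] at this
        omega
      have hj : pvAInner arr arr.length v (i + 1) = i + 1 + c :=
        pvAInner_eq arr v (i + 1) (by omega)
      rw [pvAOuter_step min arr arr.length i hiln, ← hv, hj]
      have hjle : i + 1 + c ≤ arr.length := by omega
      have hdropj : (arr.drop (i + 1)).drop c = arr.drop (i + 1 + c) := by
        rw [List.drop_drop, Nat.add_comm]
      have hruns : runsOf (arr.drop i) = (v, 1 + c) :: runsOf (arr.drop (i + 1 + c)) := by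
        rw [hdi]
        show runsFrom v 1 _ = _
        rw [runsFrom_eq, ← hc, hdropj]
      have hlentake : (arr.take i).length = i := by simp; omega
      have htakej : arr.take (i + 1 + c) = arr.take i ++ List.replicate (c + 1) v := by
        have h1 : i + 1 + c = i + (c + 1) := by omega
        rw [h1, List.take_add, hdi, List.take_succ_cons]
        rw [hc, take_leadCount, ← hc, ← List.replicate_succ]
      have hgetic : arr.getD (i + c) 0 = v := by
        have h1 : arr.getD (i + c) 0 = (arr.drop i).getD c 0 := by
          rw [List.getD_eq_getElem?_getD, List.getD_eq_getElem?_getD, List.getElem?_drop]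
        rw [h1, hdi]
        cases hc0 : c with
        | zero => simp
        | succ c' =>
            simp only [List.getD_cons_succ]
            exact leadCount_getD v _ c' (by omega)
      by_cases hshort : ((i + 1 + c : Nat) : Int) - (i : Nat) < min
      · -- short run: fill then recurse
        rw [if_pos hshort]
        have hshort' : ¬ min ≤ ((1 + c : Nat) : Int) := by push_cast at hshort ⊢; omega
        set fill := fillA arr arr.length i (i + 1 + c) with hfill
        have harr'eq : pvSetRange arr fill i (i + 1 + c)
            = arr.take i ++ List.replicate (c + 1) fill ++ arr.drop (i + 1 + c) := by
          rw [pvSetRange_eq arr fill i (i + 1 + c) (by omega) hjle]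
          rw [show i + 1 + c - i = c + 1 from by omega]
        have hlen' : (pvSetRange arr fill i (i + 1 + c)).length = arr.length := by
          rw [harr'eq]
          simp only [List.length_append, List.length_replicate, hlentake, List.length_drop]
          omega
        have l2 : (arr.take i ++ List.replicate (c + 1) fill).length = i + 1 + c := by
          simp [hlentake]
          omega
        have hdrop' : (pvSetRange arr fill i (i + 1 + c)).drop (i + 1 + c)
            = arr.drop (i + 1 + c) := by
          rw [harr'eq, List.drop_append, l2, Nat.sub_self, List.drop_zero]
          rw [List.drop_of_length_le (le_of_eq l2), List.nil_append]
        have htake' : (pvSetRange arr fill i (i + 1 + c)).take (i + 1 + c)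
            = arr.take i ++ List.replicate (c + 1) fill := by
          rw [harr'eq, List.take_append, l2, Nat.sub_self, List.take_zero]
          rw [List.take_of_length_le (le_of_eq l2), List.append_nil]
        have hget' : (pvSetRange arr fill i (i + 1 + c)).getD (i + 1 + c - 1) 0 = fill := by
          have hidx : i + 1 + c - 1 = i + c := by omega
          rw [harr'eq, hidx, List.getD_eq_getElem?_getD]
          rw [List.getElem?_append_left (by rw [l2]; omega)]
          rw [List.getElem?_append_right (by rw [hlentake]; omega)]
          rw [hlentake, Nat.add_sub_cancel_left]
          simp
        have hfe : fillVal min (if i = 0 then none else some (arr.getD (i - 1) 0)) v (1 + c)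
            (runsOf (arr.drop (i + 1 + c))) = fill := by
          rw [fillVal.eq_def, if_neg hshort', hfill]
          by_cases hi0 : i = 0
          · subst hi0
            rw [if_pos rfl]
            by_cases hn : 0 + 1 + c < arr.length
            · have hd2 : arr.drop (0 + 1 + c)
                  = arr.getD (0 + 1 + c) 0 :: arr.drop (0 + 1 + c + 1) :=
                drop_getD_cons arr _ hn
              have hr2 : runsOf (arr.drop (0 + 1 + c))
                  = (arr.getD (0 + 1 + c) 0,
                      1 + leadCount (arr.getD (0 + 1 + c) 0) (arr.drop (0 + 1 + c + 1))) ::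
                    runsOf ((arr.drop (0 + 1 + c + 1)).drop
                      (leadCount (arr.getD (0 + 1 + c) 0) (arr.drop (0 + 1 + c + 1)))) := by
                rw [hd2]
                show runsFrom _ 1 _ = _
                rw [runsFrom_eq]
              rw [hr2]
              show arr.getD (0 + 1 + c) 0 = fillA arr arr.length 0 (0 + 1 + c)
              simp [fillA, hn]
            · have hnil : arr.drop (0 + 1 + c) = [] := List.drop_of_length_le (by omega)
              rw [hnil]
              show v = fillA arr arr.length 0 (0 + 1 + c)
              simp only [fillA, lt_irrefl, if_neg hn, if_false, Option.isSome_none,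
                Bool.false_and, Bool.false_eq_true]
              exact hv
          · rw [if_neg hi0]
            show arr.getD (i - 1) 0 = fillA arr arr.length i (i + 1 + c)
            have h0i : 0 < i := Nat.pos_of_ne_zero hi0
            simp only [fillA, h0i, if_true, Option.isSome_some, Option.getD_some, Bool.true_and]
            split_ifs <;> simp_all
        have hrec := ih (pvSetRange arr fill i (i + 1 + c)) (i + 1 + c)
          (by rw [hlen']; omega) (by rw [hlen']; omega)
        rw [hlen'] at hrec
        rw [hrec, if_neg (by omega), hget', hdrop', htake', hruns, pvFillRuns_cons, hfe]
        rw [show (1 + c) = (c + 1) from by omega]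
        simp [List.append_assoc]
      · -- long run: arr unchanged
        rw [if_neg hshort]
        have hlong : min ≤ ((1 + c : Nat) : Int) := by push_cast at hshort ⊢; omega
        have hrec := ih arr (i + 1 + c) (by omega) (by omega)
        rw [hrec, if_neg (by omega)]
        have hidx : i + 1 + c - 1 = i + c := by omega
        rw [hidx, hgetic, htakej, hruns, pvFillRuns_cons]
        have hfe : fillVal min (if i = 0 then none else some (arr.getD (i - 1) 0)) v (1 + c)
            (runsOf (arr.drop (i + 1 + c))) = v := by
          rw [fillVal.eq_def, if_pos hlong]
        rw [hfe]
        rw [show (1 + c) = (c + 1) from by omega]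
        simp [List.append_assoc]

theorem pvAOuter_eq (min : Int) (arr : List Int) (i : Nat) (hi : i ≤ arr.length) :
    pvAOuter min arr arr.length i =
      arr.take i ++
        pvFillRuns min (if i = 0 then none else some (arr.getD (i - 1) 0)) (runsOf (arr.drop i)) :=
  pvAOuter_eq_aux min arr.length arr i hi (by omega)

-- ===== VERDICT (by name: the statement is the Claim_ definition above) =====
theorem smooth_short_runs_spec : Claim_equal_smooth_short_runs := by
  intro sequence min_run_len _
  unfold Spec_smooth_short_runs smooth_short_runs smooth_short_runs_alt
  by_cases hs : sequence = []
  · simp [hs]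
  · rw [if_neg hs, if_neg hs, rle_eq_runsOf]
    have := pvAOuter_eq min_run_len sequence 0 (by omega)
    simpa using this
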